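-- pv_equiv track=rewrite | github.com/rockhowse/GeneHacks | assembly/assembly_utils.py | pick_maximal_overlap
-- ===== SOURCE A (Python) =====
-- from itertools import permutations
--
-- def overlap(str_1, str_2, min_overlap_length=3):
--     """
--     function that returns the number of overlapping characters between the suffix of str_1 overlaps and
--     the prefix of str_2 with at LEAST min_overlap_len characters matching. Default of 3.
--
--     :param str_1:
--     :param str_2:
--     :param min_overlap_length:
--     :return:
--     """
--
--     start = 0
--
--     while True:
--         start = str_1.find(str_2[:min_overlap_length], start)
--
--         # if we didn't find the suffix of str_1 in str_2, return 0
--         if start == -1: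
--             return 0
--
--         # if str_2 string starts with the suffix of str_1 at offset start
--         # return the number of overlapping characters with str_1
--         if str_2.startswith(str_1[start:]):
--             return len(str_1)-start
--
--         start += 1
--
-- def pick_maximal_overlap(reads, k):
--     """
--     Finds the two reads with the maximal overlap, combines them and returns both reads and the overlap length
--
--     :param reads:
--     :param k:
--     :return:
--     """
--     read_a, read_b = None, None
--
--     best_overlap_length = 0
--
--     for a,b in permutations(reads, 2):
--         overlap_length = overlap(a, b, min_overlap_length=k)
--
--         # only returns the FIRST overlap length we run into
--         if overlap_length > best_overlap_length:
--             read_a, read_b = a, b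
--
--             best_overlap_length = overlap_length
--
--     return read_a, read_b, best_overlap_length
-- ===== SOURCE B (Python) =====
-- def _overlap(a, b, k):
--     """Maximal o with a's suffix of length o equal to b's prefix of length o
--     and o >= len(b[:k]); tried from the largest possible o downward."""
--     least = len(b[:k])
--     for o in range(min(len(a), len(b)), 0, -1):
--         if o >= least and b[:o] == a[len(a) - o:]:
--             return o
--     return 0
--
--
-- def pick_maximal_overlap(reads, k):
--     cands = [(_overlap(a, b, k), a, b)
--              for i, a in enumerate(reads)
--              for j, b in enumerate(reads)
--              if i != j]
--     best = max(cands, key=lambda t: t[0], default=(0, None, None))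
--     if best[0] == 0:
--         return None, None, 0
--     return best[1], best[2], best[0]
-- ===== Notes on version B (the rewrite author's own statement) =====
-- stated objective: alternative
-- what changed: overlap is computed by testing candidate suffix/prefix match lengths from the largest possible one downward (no find-substring-and-check loop), and the best pair is picked as the first maximum of a generated candidate list instead of a running strict-improvement accumulator over permutations
import Mathlib
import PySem

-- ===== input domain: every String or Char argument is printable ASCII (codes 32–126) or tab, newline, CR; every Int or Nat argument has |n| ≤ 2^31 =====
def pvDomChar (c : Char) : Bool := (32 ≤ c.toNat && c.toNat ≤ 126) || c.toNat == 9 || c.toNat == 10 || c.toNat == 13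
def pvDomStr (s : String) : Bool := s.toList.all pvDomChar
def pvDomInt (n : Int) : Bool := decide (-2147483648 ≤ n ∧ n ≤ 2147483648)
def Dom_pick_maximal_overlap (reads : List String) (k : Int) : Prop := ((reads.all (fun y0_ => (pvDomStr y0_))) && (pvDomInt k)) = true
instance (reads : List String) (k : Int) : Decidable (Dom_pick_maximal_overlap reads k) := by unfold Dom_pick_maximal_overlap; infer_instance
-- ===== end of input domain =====

-- B replaces A's find-substring-then-check overlap loop by a direct scan of candidate
-- overlap lengths from the largest downward, and selects the best pair as the first
-- maximum of a generated candidate list (same cost; objective: alternative).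

-- ===== PORT A =====

-- A's `overlap` while-loop: `start` rises strictly each iteration, so
-- `len(str_1)+1` rounds of fuel always suffice; start is a Nat (Python start ≥ 0 here).
def pvOverlapLoopA (a b p : List Char) : Nat → Nat → Int
  | 0, _ => 0
  | fuel+1, start =>
    let f := PySem.Chars.findFrom a p (start : Int) none
    if f = -1 then 0
    else if PySem.Chars.startswith b (a.drop f.toNat) then (a.length : Int) - f
    else pvOverlapLoopA a b p fuel (f.toNat + 1)

def pvOverlapA (s1 s2 : String) (k : Int) : Int :=
  pvOverlapLoopA s1.toList s2.toList (PySem.Chars.slice s2.toList none (some k))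
    (s1.toList.length + 1) 0

-- itertools.permutations(reads, 2) yields ordered pairs of DISTINCT POSITIONS in index order
def pick_maximal_overlap (reads : List String) (k : Int) : Option String × Option String × Int :=
  let pairs := (PySem.List.enumerate reads).flatMap (fun ia =>
    (PySem.List.enumerate reads).filterMap (fun jb =>
      if ia.1 ≠ jb.1 then some (ia.2, jb.2) else none))
  pairs.foldl (fun st ab =>
    let ol := pvOverlapA ab.1 ab.2 k
    if st.2.2 < ol then (some ab.1, some ab.2, ol) else st) (none, none, 0)

-- ===== PORT B =====

-- B's `for o in range(min(len(a),len(b)), 0, -1)` loop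
def pvOverlapLoopB (a b : List Char) (least : Nat) : Nat → Int
  | 0 => 0
  | o+1 =>
    if least ≤ o+1 ∧ b.take (o+1) = a.drop (a.length - (o+1)) then ((o+1 : Nat) : Int)
    else pvOverlapLoopB a b least o

def pvOverlapAlt (a b : String) (k : Int) : Int :=
  let least := (PySem.Chars.slice b.toList none (some k)).length
  pvOverlapLoopB a.toList b.toList least (min a.toList.length b.toList.length)

def pick_maximal_overlap_alt (reads : List String) (k : Int) : Option String × Option String × Int :=
  let cands := (PySem.List.enumerate reads).flatMap (fun ia =>
    (PySem.List.enumerate reads).filterMap (fun jb =>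
      if ia.1 ≠ jb.1 then some (pvOverlapAlt ia.2 jb.2 k, ia.2, jb.2) else none))
  match cands with
  | [] => (none, none, 0)
  | t :: rest =>
    let best := rest.foldl (fun bst t' => if bst.1 < t'.1 then t' else bst) t
    if best.1 = 0 then (none, none, 0) else (some best.2.1, some best.2.2, best.1)

-- ===== PRECONDITION & SPEC =====
def Spec_pick_maximal_overlap (reads : List String) (k : Int) (out : Option String × Option String × Int) : Prop := out = pick_maximal_overlap_alt reads k
instance (reads : List String) (k : Int) (out : Option String × Option String × Int) : Decidable (Spec_pick_maximal_overlap reads k out) := by unfold Spec_pick_maximal_overlap; infer_instance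

-- ===== CLAIM (what is proved, stated in full; the proofs are below) =====
def Claim_equal_pick_maximal_overlap : Prop := ∀ (reads : List String) (k : Int), Dom_pick_maximal_overlap reads k → Spec_pick_maximal_overlap reads k (pick_maximal_overlap reads k)

-- ===== LEMMAS AND PROOFS =====

-- success predicate of A's loop: the suffix of a starting at s is a prefix of b and long enough
def pvPP (a b p : List Char) (s : Nat) : Prop := a.drop s <+: b ∧ p.length ≤ a.length - s
-- success predicate of B's loop: overlap length o works
def pvQQ (a b : List Char) (least : Nat) (o : Nat) : Prop :=
  least ≤ o ∧ b.take o = a.drop (a.length - o)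

lemma pvSlice_prefix {α : Type} (xs : List α) (i : Int) :
    PySem.List.slice xs none (some i) <+: xs := by
  rcases (by omega : 0 ≤ i ∨ i < 0) with hi | hi
  · rw [PySem.List.slice_to xs hi]
    exact List.take_prefix _ _
  · have hk : 0 < (-i).toNat := by omega
    have hi' : i = -(((-i).toNat : Nat) : Int) := by omega
    rw [hi', PySem.List.slice_to_neg_natCast xs _ hk]
    exact List.take_prefix _ _

lemma pvPP_occ {a b p : List Char} (hp : p <+: b) {s : Nat} (h : pvPP a b p s) :
    p <+: a.drop s := by
  obtain ⟨h1, h2⟩ := h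
  have e1 : a.drop s = b.take (a.length - s) := by
    have h3 := List.prefix_iff_eq_take.mp h1
    rwa [List.length_drop] at h3
  have e2 : p = b.take p.length := List.prefix_iff_eq_take.mp hp
  rw [List.prefix_iff_eq_take, e1, List.take_take, min_eq_left h2]
  exact e2

lemma pvFind_spec (a p : List Char) (s : Nat) (hs : s ≤ a.length)
    (hne : PySem.Chars.findFrom a p (s : Int) none ≠ -1) :
    0 ≤ PySem.Chars.findFrom a p (s : Int) none ∧
    s ≤ (PySem.Chars.findFrom a p (s : Int) none).toNat ∧
    (PySem.Chars.findFrom a p (s : Int) none).toNat ≤ a.length ∧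
    p <+: a.drop (PySem.Chars.findFrom a p (s : Int) none).toNat ∧
    (∀ i, s ≤ i → i < (PySem.Chars.findFrom a p (s : Int) none).toNat → ¬ p <+: a.drop i) := by
  obtain ⟨h1, h2, h3⟩ := PySem.Chars.findFrom_natCast_spec a p s hs hne
  have h4 := PySem.Chars.findFrom_natCast a p s hs
  have h5 := PySem.Chars.find_le_length (a.drop s) p
  have h7 := PySem.Chars.neg_one_le_find (a.drop s) p
  rw [List.length_drop] at h5
  by_cases h6 : PySem.Chars.find (a.drop s) p = -1
  · rw [if_pos h6] at h4
    exact absurd h4 hne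
  · rw [if_neg h6] at h4
    refine ⟨by omega, by omega, by omega, h2, h3⟩

lemma pvCharA_none (a b p : List Char) (_hp : p <+: b) :
    ∀ (fuel s : Nat), s ≤ a.length → a.length + 1 ≤ fuel + s →
    (∀ s', s ≤ s' → s' ≤ a.length → ¬ pvPP a b p s') →
    pvOverlapLoopA a b p fuel s = 0 := by
  intro fuel
  induction fuel with
  | zero => intro s _ _ _; rfl
  | succ n ih =>
    intro s hs hfuel hno
    by_cases hf : PySem.Chars.findFrom a p (s : Int) none = -1
    · simp [pvOverlapLoopA, hf]
    · obtain ⟨hf0, hsf, hfl, hocc, hminf⟩ := pvFind_spec a p s hs hf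
      by_cases hsw : PySem.Chars.startswith b
          (a.drop (PySem.Chars.findFrom a p (s : Int) none).toNat) = true
      · exfalso
        refine hno _ hsf hfl ⟨(PySem.Chars.startswith_iff _ _).mp hsw, ?_⟩
        have h8 := hocc.length_le
        rwa [List.length_drop] at h8
      · have hne2 : (PySem.Chars.findFrom a p (s : Int) none).toNat ≠ a.length := by
          intro hEq
          apply hsw
          rw [hEq, List.drop_length]
          exact (PySem.Chars.startswith_iff _ _).mpr (List.nil_prefix)
        have hlt : (PySem.Chars.findFrom a p (s : Int) none).toNat < a.length :=
          lt_of_le_of_ne hfl hne2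
        have hstep : pvOverlapLoopA a b p (n+1) s
            = pvOverlapLoopA a b p n ((PySem.Chars.findFrom a p (s : Int) none).toNat + 1) := by
          simp [pvOverlapLoopA, hf, hsw]
        rw [hstep]
        exact ih _ hlt (by omega) (fun s' h1 h2 => hno s' (by omega) h2)

lemma pvCharA_found (a b p : List Char) (hp : p <+: b) :
    ∀ (fuel s s₀ : Nat), s ≤ a.length → a.length + 1 ≤ fuel + s →
    s ≤ s₀ → s₀ ≤ a.length → pvPP a b p s₀ →
    (∀ s', s ≤ s' → s' < s₀ → ¬ pvPP a b p s') →
    pvOverlapLoopA a b p fuel s = (a.length : Int) - s₀ := by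
  intro fuel
  induction fuel with
  | zero => intro s s₀ hs hfuel _ _ _ _; exact absurd hfuel (by omega)
  | succ n ih =>
    intro s s₀ hs hfuel hss₀ hs₀l hPP hmin
    have hocc₀ : p <+: a.drop s₀ := pvPP_occ hp hPP
    by_cases hf : PySem.Chars.findFrom a p (s : Int) none = -1
    · exfalso
      have hni := (PySem.Chars.findFrom_natCast_eq_neg_one_iff a p s hs).mp hf
      apply hni
      have hdd : p <+: (a.drop s).drop (s₀ - s) := by
        rw [List.drop_drop]
        have he : s + (s₀ - s) = s₀ := by omega
        rw [he]
        exact hocc₀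
      have hin : PySem.Chars.isIn p (a.drop s) = true :=
        (PySem.Chars.exists_prefix_drop_iff_isIn p (a.drop s)).mp ⟨s₀ - s, hdd⟩
      exact (PySem.Chars.isIn_iff_infix p (a.drop s)).mp hin
    · obtain ⟨hf0, hsf, hfl, hocc, hminf⟩ := pvFind_spec a p s hs hf
      have hfle : (PySem.Chars.findFrom a p (s : Int) none).toNat ≤ s₀ := by
        by_contra hgt
        exact hminf s₀ hss₀ (by omega) hocc₀
      by_cases hsw : PySem.Chars.startswith b
          (a.drop (PySem.Chars.findFrom a p (s : Int) none).toNat) = true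
      · have hPPf : pvPP a b p (PySem.Chars.findFrom a p (s : Int) none).toNat := by
          refine ⟨(PySem.Chars.startswith_iff _ _).mp hsw, ?_⟩
          have h8 := hocc.length_le
          rwa [List.length_drop] at h8
        have heq : (PySem.Chars.findFrom a p (s : Int) none).toNat = s₀ := by
          rcases lt_or_eq_of_le hfle with hlt | he
          · exact absurd hPPf (hmin _ hsf hlt)
          · exact he
        have hstep : pvOverlapLoopA a b p (n+1) s
            = (a.length : Int) - PySem.Chars.findFrom a p (s : Int) none := by
          simp [pvOverlapLoopA, hf, hsw]
        rw [hstep]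
        omega
      · have hPPf : ¬ pvPP a b p (PySem.Chars.findFrom a p (s : Int) none).toNat := by
          intro hPPf
          exact hsw ((PySem.Chars.startswith_iff _ _).mpr hPPf.1)
        have hflt : (PySem.Chars.findFrom a p (s : Int) none).toNat < s₀ := by
          rcases lt_or_eq_of_le hfle with h | h
          · exact h
          · exact absurd (h ▸ hPP) hPPf
        have hstep : pvOverlapLoopA a b p (n+1) s
            = pvOverlapLoopA a b p n ((PySem.Chars.findFrom a p (s : Int) none).toNat + 1) := by
          simp [pvOverlapLoopA, hf, hsw]
        rw [hstep]
        exact ih _ s₀ (by omega) (by omega) (by omega) hs₀l hPP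
          (fun s' h1 h2 => hmin s' (by omega) h2)

lemma pvCharB_none (a b : List Char) (least : Nat) :
    ∀ o : Nat, (∀ o', 1 ≤ o' → o' ≤ o → ¬ pvQQ a b least o') →
    pvOverlapLoopB a b least o = 0 := by
  intro o
  induction o with
  | zero => intro _; rfl
  | succ o ih =>
    intro hno
    by_cases hc : least ≤ o+1 ∧ b.take (o+1) = a.drop (a.length - (o+1))
    · exact absurd hc (hno (o+1) (by omega) le_rfl)
    · have hstep : pvOverlapLoopB a b least (o+1) = pvOverlapLoopB a b least o := by
        simp [pvOverlapLoopB, hc]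
      rw [hstep]
      exact ih (fun o' h1 h2 => hno o' h1 (by omega))

lemma pvCharB_found (a b : List Char) (least : Nat) :
    ∀ (o o₀ : Nat), 1 ≤ o₀ → o₀ ≤ o → pvQQ a b least o₀ →
    (∀ o', o₀ < o' → o' ≤ o → ¬ pvQQ a b least o') →
    pvOverlapLoopB a b least o = (o₀ : Int) := by
  intro o
  induction o with
  | zero => intro o₀ h1 hle _ _; exact absurd (h1.trans hle) (by omega)
  | succ o ih =>
    intro o₀ h1 hle hQ hmax
    by_cases hc : least ≤ o+1 ∧ b.take (o+1) = a.drop (a.length - (o+1))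
    · have heq : o₀ = o + 1 := by
        by_contra hne
        have hlt : o₀ < o + 1 := by omega
        exact hmax (o+1) hlt le_rfl hc
      have hstep : pvOverlapLoopB a b least (o+1) = ((o+1 : Nat) : Int) := by
        simp [pvOverlapLoopB, hc]
      rw [hstep, heq]
    · have hne : o₀ ≠ o+1 := fun he => hc (he ▸ hQ)
      have hstep : pvOverlapLoopB a b least (o+1) = pvOverlapLoopB a b least o := by
        simp [pvOverlapLoopB, hc]
      rw [hstep]
      exact ih o₀ h1 (by omega) hQ (fun o' ha hb => hmax o' ha (by omega))

lemma pvOverlapLoopB_nonneg (a b : List Char) (least : Nat) :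
    ∀ o, 0 ≤ pvOverlapLoopB a b least o := by
  intro o
  induction o with
  | zero => simp [pvOverlapLoopB]
  | succ o ih =>
    by_cases hc : least ≤ o+1 ∧ b.take (o+1) = a.drop (a.length - (o+1))
    · have hstep : pvOverlapLoopB a b least (o+1) = ((o+1 : Nat) : Int) := by
        simp [pvOverlapLoopB, hc]
      rw [hstep]
      omega
    · have hstep : pvOverlapLoopB a b least (o+1) = pvOverlapLoopB a b least o := by
        simp [pvOverlapLoopB, hc]
      rw [hstep]
      exact ih

lemma pvOverlapAlt_nonneg (a b : String) (k : Int) : 0 ≤ pvOverlapAlt a b k :=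
  pvOverlapLoopB_nonneg _ _ _ _

lemma pvQQ_to_PP (a b p : List Char) (o' : Nat) (h2a : o' ≤ a.length)
    (hQ : pvQQ a b p.length o') : pvPP a b p (a.length - o') := by
  obtain ⟨hq1, hq2⟩ := hQ
  constructor
  · rw [← hq2]
    exact List.take_prefix _ _
  · omega

lemma pvPP_to_QQ (a b p : List Char) (s' : Nat) (hs : s' ≤ a.length)
    (hPP : pvPP a b p s') : pvQQ a b p.length (a.length - s') ∧ a.length - s' ≤ b.length := by
  obtain ⟨h1, h2⟩ := hPP
  have e1 : a.drop s' = b.take (a.length - s') := by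
    have h3 := List.prefix_iff_eq_take.mp h1
    rwa [List.length_drop] at h3
  have hlb : a.length - s' ≤ b.length := by
    have h4 := h1.length_le
    rwa [List.length_drop] at h4
  refine ⟨⟨h2, ?_⟩, hlb⟩
  have he : a.length - (a.length - s') = s' := by omega
  rw [he, e1]

lemma pvOverlap_eq (s1 s2 : String) (k : Int) :
    pvOverlapA s1 s2 k = pvOverlapAlt s1 s2 k := by
  classical
  simp only [pvOverlapA, pvOverlapAlt]
  set a := s1.toList with ha
  set b := s2.toList with hb
  set p := PySem.Chars.slice b none (some k) with hpdef
  have hp : p <+: b := by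
    rw [hpdef, PySem.Chars.slice_eq_listSlice]
    exact pvSlice_prefix b k
  by_cases hex : ∃ s', s' ≤ a.length ∧ pvPP a b p s'
  · obtain ⟨hs₀l, hPP₀⟩ := Nat.find_spec hex
    set s₀ := Nat.find hex with hs₀def
    have hA : pvOverlapLoopA a b p (a.length + 1) 0 = (a.length : Int) - s₀ :=
      pvCharA_found a b p hp (a.length+1) 0 s₀ (Nat.zero_le _) (by omega) (Nat.zero_le _)
        hs₀l hPP₀ (fun s' _ hlt hPP' => Nat.find_min hex hlt ⟨by omega, hPP'⟩)
    rw [hA]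
    rcases eq_or_lt_of_le hs₀l with heq | hlt
    · have hB : pvOverlapLoopB a b p.length (min a.length b.length) = 0 := by
        apply pvCharB_none
        intro o' h1 h2 hQ
        have h2' : o' ≤ a.length := le_trans h2 (min_le_left _ _)
        have hPP' := pvQQ_to_PP a b p o' h2' hQ
        exact Nat.find_min hex (by omega) ⟨by omega, hPP'⟩
      rw [hB]
      omega
    · obtain ⟨hQ₀, hlb⟩ := pvPP_to_QQ a b p s₀ hs₀l hPP₀
      have hB : pvOverlapLoopB a b p.length (min a.length b.length)
          = ((a.length - s₀ : Nat) : Int) := by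
        apply pvCharB_found a b p.length _ _ (by omega) (le_min (by omega) hlb) hQ₀
        intro o' hgt hle hQ
        have ho'la : o' ≤ a.length := le_trans hle (min_le_left _ _)
        have hPP' := pvQQ_to_PP a b p o' ho'la hQ
        exact Nat.find_min hex (show a.length - o' < s₀ by omega) ⟨by omega, hPP'⟩
      rw [hB]
      omega
  · push Not at hex
    rw [pvCharA_none a b p hp (a.length+1) 0 (Nat.zero_le _) (by omega)
        (fun s' _ h2 => hex s' h2)]
    rw [pvCharB_none a b p.length _ (fun o' h1 h2 hQ =>
      hex (a.length - o') (by omega)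
        (pvQQ_to_PP a b p o' (le_trans h2 (min_le_left _ _)) hQ))]

lemma pvFilterMapAux (k : Int) (y : String) (i : Int) (l : List (Int × String)) :
    l.filterMap (fun jb => if i ≠ jb.1 then some (pvOverlapAlt y jb.2 k, y, jb.2) else none)
      = (l.filterMap (fun jb => if i ≠ jb.1 then some (y, jb.2) else none)).map
          (fun ab => (pvOverlapAlt ab.1 ab.2 k, ab.1, ab.2)) := by
  induction l with
  | nil => rfl
  | cons x xs ih =>
    by_cases hx : i ≠ x.1
    · simp only [List.filterMap_cons]
      simp [hx]
      simpa using ih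
    · simp only [List.filterMap_cons]
      simp [hx]
      simpa using ih

lemma pvCands_eq (reads : List String) (k : Int) :
    ((PySem.List.enumerate reads).flatMap (fun ia =>
      (PySem.List.enumerate reads).filterMap (fun jb =>
        if ia.1 ≠ jb.1 then some (pvOverlapAlt ia.2 jb.2 k, ia.2, jb.2) else none)))
      = (((PySem.List.enumerate reads).flatMap (fun ia =>
          (PySem.List.enumerate reads).filterMap (fun jb =>
            if ia.1 ≠ jb.1 then some (ia.2, jb.2) else none))).map
          (fun ab => (pvOverlapAlt ab.1 ab.2 k, ab.1, ab.2))) := by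
  rw [List.map_flatMap]
  congr 1
  funext ia
  exact pvFilterMapAux k ia.2 ia.1 _

lemma pvFoldRel (k : Int) : ∀ (ps : List (String × String)) (ra rb : Option String)
    (c : Int) (t : Int × String × String),
    0 ≤ c → c = t.1 → (c ≠ 0 → ra = some t.2.1 ∧ rb = some t.2.2) →
    (c = 0 → ra = none ∧ rb = none) →
    List.foldl (fun st ab =>
        let ol := pvOverlapAlt ab.1 ab.2 k
        if st.2.2 < ol then (some ab.1, some ab.2, ol) else st) (ra, rb, c) ps
      = (let bst := List.foldl (fun bst t' => if bst.1 < t'.1 then t' else bst) t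
            (ps.map (fun ab => (pvOverlapAlt ab.1 ab.2 k, ab.1, ab.2)))
         if bst.1 = 0 then (none, none, 0) else (some bst.2.1, some bst.2.2, bst.1)) := by
  intro ps
  induction ps with
  | nil =>
    intro ra rb c t h0 hc hpos hzero
    simp only [List.foldl_nil, List.map_nil]
    by_cases hc0 : c = 0
    · obtain ⟨hra, hrb⟩ := hzero hc0
      rw [if_pos (show t.1 = 0 by omega), hra, hrb, hc0]
    · obtain ⟨hra, hrb⟩ := hpos hc0
      rw [if_neg (show ¬ t.1 = 0 by omega), hra, hrb, hc]
  | cons ab ps ih =>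
    intro ra rb c t h0 hc hpos hzero
    simp only [List.foldl_cons, List.map_cons]
    by_cases hlt : c < pvOverlapAlt ab.1 ab.2 k
    · rw [if_pos hlt, if_pos (show t.1 < pvOverlapAlt ab.1 ab.2 k by omega)]
      exact ih (some ab.1) (some ab.2) _ (pvOverlapAlt ab.1 ab.2 k, ab.1, ab.2)
        (by omega) rfl (fun _ => ⟨rfl, rfl⟩) (fun h => absurd h (by omega))
    · rw [if_neg hlt, if_neg (show ¬ t.1 < pvOverlapAlt ab.1 ab.2 k by omega)]
      exact ih ra rb c t h0 hc hpos hzero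

lemma pvMain (reads : List String) (k : Int) :
    pick_maximal_overlap reads k = pick_maximal_overlap_alt reads k := by
  unfold pick_maximal_overlap pick_maximal_overlap_alt
  simp only [pvOverlap_eq]
  rw [pvCands_eq]
  cases hps : (PySem.List.enumerate reads).flatMap (fun ia =>
      (PySem.List.enumerate reads).filterMap (fun jb =>
        if ia.1 ≠ jb.1 then some (ia.2, jb.2) else none)) with
  | nil => rfl
  | cons ab rest =>
    simp only [List.map_cons, List.foldl_cons]
    by_cases h0 : (0:Int) < pvOverlapAlt ab.1 ab.2 k
    · rw [if_pos h0]
      exact pvFoldRel k rest (some ab.1) (some ab.2) (pvOverlapAlt ab.1 ab.2 k)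
        (pvOverlapAlt ab.1 ab.2 k, ab.1, ab.2) (le_of_lt h0) rfl
        (fun _ => ⟨rfl, rfl⟩) (fun h => absurd h (by omega))
    · have hv0 : pvOverlapAlt ab.1 ab.2 k = 0 :=
        le_antisymm (not_lt.mp h0) (pvOverlapAlt_nonneg ab.1 ab.2 k)
      rw [if_neg h0]
      exact pvFoldRel k rest none none 0 (pvOverlapAlt ab.1 ab.2 k, ab.1, ab.2)
        le_rfl hv0.symm (fun h => absurd rfl h) (fun _ => ⟨rfl, rfl⟩)

-- ===== VERDICT (by name: the statement is the Claim_ definition above) =====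
theorem pick_maximal_overlap_spec : Claim_equal_pick_maximal_overlap := by
  intro reads k _
  unfold Spec_pick_maximal_overlap
  exact pvMain reads k
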